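-- pv_equiv track=rewrite | github.com/won2lee/preProc | trns/utils_v2.py | get_sents_lenth4
-- ===== SOURCE A (Python) =====
-- def get_sents_lenth4(source, sbol):
--
--     if type(source[0]) is not list:
--         source = [source]
--     src_len = [len(s) for s in source]
--
--     XO = [[(k,0) if i >0 and s[i-1] in sbol[0] else (k,1) for i,k in enumerate(s) if k!=sbol[1]] for j,s in enumerate(source) ]
--     XO = [[(k,0) if k in sbol[0] or v==0 else (k,1) for (k,v) in s] for s in XO]
--     XO = [[0]+[v for (k,v) in s][1:]+[0] for s in XO]
--
--     XX = [[i for i,v in enumerate(s) if v==0] for s in XO]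
--     XX = [[s[i]-s[i-1] for i in range(len(s)) if i>0] for s in XX]     # index to interval lenth(어절의 길이)
--     XO = [s[:-1] for s in XO]
--     return XX, XO  #, XK  # XX: Cutter, XO: lookup target list
-- ===== SOURCE B (Python) =====
-- def get_sents_lenth4(source, sbol):
--     # Single pass per sentence: emit each kept token's flag directly, then
--     # derive interval lengths with a running counter (no staged XO lists,
--     # no zero-index list + difference step).
--     if source and not isinstance(source[0], list):
--         source = [source]
--     XX, XO = [], []
--     for s in source:
--         flags = []
--         for i, k in enumerate(s):
--             if k == sbol[1]:
--                 continue
--             if k in sbol[0] or (i > 0 and s[i - 1] in sbol[0]):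
--                 flags.append(0)
--             else:
--                 flags.append(1)
--         XO.append([0] + flags[1:])      # first kept token is forced to 0
--         lens, c = [], 0
--         for v in flags[1:] + [0]:       # trailing sentinel zero, used only for XX
--             c += 1
--             if v == 0:
--                 lens.append(c)
--                 c = 0
--         XX.append(lens)
--     return XX, XO
-- ===== Notes on version B (the rewrite author's own statement) =====
-- stated objective: simpler
-- what changed: B computes each kept token's final flag in one direct pass per sentence (instead of A's three staged XO comprehensions) and derives interval lengths with a running tokens-since-last-zero counter instead of collecting zero indices and differencing them.
import Mathlib
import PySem

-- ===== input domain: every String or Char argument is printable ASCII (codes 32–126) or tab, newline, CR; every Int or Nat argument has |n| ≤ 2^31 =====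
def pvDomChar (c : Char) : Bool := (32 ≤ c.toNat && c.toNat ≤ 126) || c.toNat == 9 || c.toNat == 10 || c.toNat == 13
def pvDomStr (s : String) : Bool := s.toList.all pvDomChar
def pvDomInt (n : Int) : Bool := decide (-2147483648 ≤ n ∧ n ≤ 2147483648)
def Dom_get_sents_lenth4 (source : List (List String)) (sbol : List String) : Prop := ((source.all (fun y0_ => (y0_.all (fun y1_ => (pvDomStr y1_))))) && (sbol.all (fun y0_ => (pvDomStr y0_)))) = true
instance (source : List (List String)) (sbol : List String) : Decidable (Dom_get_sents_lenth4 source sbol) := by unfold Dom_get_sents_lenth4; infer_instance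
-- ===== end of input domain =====

-- B fuses A's three staged XO lists into one direct flag pass per sentence and
-- replaces the zero-index-list-then-difference step by a running counter (objective: simpler).

-- ===== PORT A =====
-- first comprehension: keep tokens k ≠ sbol[1] with original index i; value 0 iff i>0 and s[i-1] in sbol[0]
-- (the index i-1 is always in range there, so `pyGetD … ""` is exact)
def pvA_row1 (s : List String) (sbol0 sbol1 : String) : List (String × Int) :=
  (PySem.List.enumerate s).filterMap (fun iv =>
    if iv.2 ≠ sbol1 then
      some (if 0 < iv.1 ∧ PySem.Str.isIn (PySem.List.pyGetD s (iv.1 - 1) "") sbol0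
            then (iv.2, (0 : Int)) else (iv.2, (1 : Int)))
    else none)

-- second comprehension: (k,0) if k in sbol[0] or v==0 else (k,1)
def pvA_row2 (s : List (String × Int)) (sbol0 : String) : List (String × Int) :=
  s.map (fun p => if PySem.Str.isIn p.1 sbol0 ∨ p.2 = 0 then (p.1, (0 : Int)) else (p.1, (1 : Int)))

-- third comprehension: [0] + [v for (k,v) in s][1:] + [0]
def pvA_row3 (s : List (String × Int)) : List Int :=
  [0] ++ PySem.List.slice (s.map (fun p => p.2)) (some 1) none ++ [0]

-- [i for i,v in enumerate(s) if v==0]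
def pvA_zeros (s : List Int) : List Int :=
  (PySem.List.enumerate s).filterMap (fun iv => if iv.2 = 0 then some iv.1 else none)

-- [s[i]-s[i-1] for i in range(len(s)) if i>0]  (both indices in range whenever i>0, so `pyGetD … 0` is exact)
def pvA_diffs (s : List Int) : List Int :=
  (PySem.List.pyRange 0 (s.length : Int) 1).filterMap (fun i =>
    if 0 < i then some (PySem.List.pyGetD s i 0 - PySem.List.pyGetD s (i - 1) 0) else none)

-- The Python guard `if type(source[0]) is not list: source = [source]` can never fire under the
-- typed signature (elements are lists), but `source[0]` raises IndexError on source = []: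
-- Pre_ excludes that.  sbol[0]/sbol[1] are only read inside the comprehensions; Pre_ admits
-- exactly the inputs where those reads cannot raise, so `getD ""` below is exact on Pre_.
def get_sents_lenth4 (source : List (List String)) (sbol : List String) : List (List Int) × List (List Int) :=
  let sbol0 := sbol.getD 0 ""
  let sbol1 := sbol.getD 1 ""
  let _src_len := source.map (fun s => (s.length : Int))   -- src_len: computed by A, never used
  let XO1 := source.map (fun s => pvA_row1 s sbol0 sbol1)
  let XO2 := XO1.map (fun s => pvA_row2 s sbol0)
  let XO3 := XO2.map pvA_row3
  let XX1 := XO3.map pvA_zeros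
  let XX2 := XX1.map pvA_diffs
  let XOf := XO3.map (fun s => PySem.List.slice s none (some (-1)))   -- s[:-1]
  (XX2, XOf)

-- ===== PORT B =====
-- one pass per sentence: the kept token's final flag directly
def pvB_flags (s : List String) (sbol0 sbol1 : String) : List Int :=
  (PySem.List.enumerate s).filterMap (fun iv =>
    if iv.2 = sbol1 then none
    else if PySem.Str.isIn iv.2 sbol0 ∨
            (0 < iv.1 ∧ PySem.Str.isIn (PySem.List.pyGetD s (iv.1 - 1) "") sbol0)
         then some (0 : Int) else some (1 : Int))

-- running counter: emit tokens-since-last-zero at each zero, reset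
def pvB_scan : List Int → Int → List Int
  | [], _ => []
  | v :: t, c => if v = 0 then (c + 1) :: pvB_scan t 0 else pvB_scan t (c + 1)

def get_sents_lenth4_alt (source : List (List String)) (sbol : List String) : List (List Int) × List (List Int) :=
  let sbol0 := sbol.getD 0 ""
  let sbol1 := sbol.getD 1 ""
  let rows := source.map (fun s =>
    let flags := pvB_flags s sbol0 sbol1
    (pvB_scan (flags.drop 1 ++ [0]) 0, (0 : Int) :: flags.drop 1))
  (rows.map (fun r => r.1), rows.map (fun r => r.2))

-- ===== PRECONDITION & SPEC =====
-- Python A raises IndexError on source = [] (source[0]) and, when some sentence is nonempty,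
-- on sbol with fewer than two elements (sbol[1], then sbol[0]); Pre_ excludes exactly those.
def Pre_get_sents_lenth4 (source : List (List String)) (sbol : List String) : Prop :=
  source ≠ [] ∧ (2 ≤ sbol.length ∨ ∀ s ∈ source, s = [])
instance (source : List (List String)) (sbol : List String) : Decidable (Pre_get_sents_lenth4 source sbol) := by
  unfold Pre_get_sents_lenth4; infer_instance

def pvWitness_get_sents_lenth4 : List (List String) × List String := ([["a", "b", "c"]], ["ab", "c"])

def Spec_get_sents_lenth4 (source : List (List String)) (sbol : List String) (out : List (List Int) × List (List Int)) : Prop := out = get_sents_lenth4_alt source sbol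
instance (source : List (List String)) (sbol : List String) (out : List (List Int) × List (List Int)) : Decidable (Spec_get_sents_lenth4 source sbol out) := by unfold Spec_get_sents_lenth4; infer_instance

-- ===== CLAIM (what is proved, stated in full; the proofs are below) =====
def Claim_equal_get_sents_lenth4 : Prop := ∀ (source : List (List String)) (sbol : List String), Dom_get_sents_lenth4 source sbol → Pre_get_sents_lenth4 source sbol → Spec_get_sents_lenth4 source sbol (get_sents_lenth4 source sbol)

-- ===== LEMMAS AND PROOFS =====

-- proof helpers: zero positions with offset, and adjacent differences from a previous value
def pvZpos : List Int → Int → List Int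
  | [], _ => []
  | v :: t, n => if v = 0 then n :: pvZpos t (n + 1) else pvZpos t (n + 1)

def pvDif : List Int → Int → List Int
  | [], _ => []
  | x :: t, prev => (x - prev) :: pvDif t x

lemma pv_vals_eq (s : List String) (sbol0 sbol1 : String) :
    (pvA_row2 (pvA_row1 s sbol0 sbol1) sbol0).map (fun p => p.2) = pvB_flags s sbol0 sbol1 := by
  unfold pvA_row1 pvA_row2 pvB_flags
  rw [List.map_map, List.map_filterMap]
  apply List.filterMap_congr
  intro iv _
  by_cases hP : iv.2 = sbol1
  · simp [hP]
  · by_cases hQ : 0 < iv.1 ∧ PySem.Str.isIn (PySem.List.pyGetD s (iv.1 - 1) "") sbol0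
    · obtain ⟨hQ1, hQ2⟩ := hQ
      simp [hP, hQ1]
      split_ifs <;> simp_all
    · by_cases hR : PySem.Str.isIn iv.2 sbol0 <;>
        simp [hP] <;> split_ifs <;> simp_all

lemma pv_zpos_eq (L : List Int) (n : Int) :
    (PySem.List.enumerate L n).filterMap (fun iv => if iv.2 = 0 then some iv.1 else none) = pvZpos L n := by
  induction L generalizing n with
  | nil => simp [pvZpos, PySem.List.enumerate_nil]
  | cons v t ih =>
    rw [PySem.List.enumerate_cons, List.filterMap_cons]
    by_cases hv : v = 0 <;> simp [pvZpos, hv, ih]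

lemma pv_zeros_eq (L : List Int) : pvA_zeros L = pvZpos L 0 := pv_zpos_eq L 0

lemma pv_diffs_aux (L : List Int) :
    ∀ (n k : Nat), n = L.length - k → 1 ≤ k →
    (PySem.List.pyRange (k : Int) (L.length : Int) 1).filterMap (fun i =>
        if 0 < i then some (PySem.List.pyGetD L i 0 - PySem.List.pyGetD L (i - 1) 0) else none)
      = List.zipWith (fun a b => a - b) (L.drop k) (L.drop (k - 1)) := by
  intro n
  induction n with
  | zero =>
    intro k hn hk
    have hlen : L.length ≤ k := by omega
    rw [PySem.List.pyRange_one_eq_nil (by exact_mod_cast hlen)]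
    rw [List.drop_eq_nil_of_le hlen]
    simp
  | succ m ih =>
    intro k hn hk
    have hklt : k < L.length := by omega
    rw [PySem.List.pyRange_one_cons (by exact_mod_cast hklt)]
    rw [List.filterMap_cons]
    have h0 : (0 : Int) < (k : Int) := by exact_mod_cast hk
    have hk1 : ((k : Int) - 1) = ((k - 1 : Nat) : Int) := by omega
    have hk1lt : k - 1 < L.length := by omega
    have hd1 : L.drop (k - 1) = L[k - 1] :: L.drop (k - 1 + 1) := List.drop_eq_getElem_cons hk1lt
    have hd2 : L.drop k = L[k] :: L.drop (k + 1) := List.drop_eq_getElem_cons hklt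
    have hkk : k - 1 + 1 = k := by omega
    rw [hkk] at hd1
    have hstep : ((k : Int) + 1) = ((k + 1 : Nat) : Int) := by omega
    rw [if_pos h0, hk1, hstep, ih (k + 1) (by omega) (by omega)]
    rw [hd1, hd2]
    simp [List.zipWith, PySem.List.pyGetD_natCast, List.getD_eq_getElem?_getD,
      List.getElem?_eq_getElem hklt, List.getElem?_eq_getElem hk1lt]

lemma pv_diffs_zip (L : List Int) :
    pvA_diffs L = List.zipWith (fun a b => a - b) L.tail L := by
  unfold pvA_diffs
  cases L with
  | nil => simp [PySem.List.pyRange_one_eq_nil]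
  | cons x t =>
    have hlen : (0 : Int) < ((x :: t).length : Int) := by exact_mod_cast Nat.succ_pos t.length
    rw [PySem.List.pyRange_one_cons hlen]
    have hmain := pv_diffs_aux (x :: t) ((x :: t).length - 1) 1 rfl (le_refl 1)
    simp only [Nat.cast_one] at hmain
    simpa using hmain

lemma pv_zip_dif (t : List Int) (z : Int) :
    List.zipWith (fun a b => a - b) t (z :: t) = pvDif t z := by
  induction t generalizing z with
  | nil => simp [pvDif]
  | cons x r ih => simp [pvDif, ih]

lemma pv_dif_scan (l : List Int) (p c : Int) :
    pvDif (pvZpos l (p + c + 1)) p = pvB_scan l c := by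
  induction l generalizing p c with
  | nil => simp [pvZpos, pvDif, pvB_scan]
  | cons v t ih =>
    by_cases hv : v = 0
    · have h1 := ih (p + c + 1) 0
      have e1 : p + c + 1 + 0 + 1 = p + c + 1 + 1 := by omega
      rw [e1] at h1
      simp [pvZpos, pvB_scan, pvDif, hv, h1]
      omega
    · have h1 := ih p (c + 1)
      have e1 : p + (c + 1) + 1 = p + c + 1 + 1 := by omega
      rw [e1] at h1
      simp [pvZpos, pvB_scan, hv, h1]

lemma pv_row3_shape (s : List String) (sbol0 sbol1 : String) :
    pvA_row3 (pvA_row2 (pvA_row1 s sbol0 sbol1) sbol0)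
      = 0 :: ((pvB_flags s sbol0 sbol1).drop 1 ++ [0]) := by
  unfold pvA_row3
  rw [pv_vals_eq s sbol0 sbol1, PySem.List.slice_from_one]
  simp [List.drop_one]

lemma pv_rowXO (s : List String) (sbol0 sbol1 : String) :
    PySem.List.slice (pvA_row3 (pvA_row2 (pvA_row1 s sbol0 sbol1) sbol0)) none (some (-1))
      = 0 :: (pvB_flags s sbol0 sbol1).drop 1 := by
  rw [pv_row3_shape, PySem.List.slice_to_neg_one]
  rw [show (0 : Int) :: ((pvB_flags s sbol0 sbol1).drop 1 ++ [0])
        = ((0 : Int) :: (pvB_flags s sbol0 sbol1).drop 1) ++ [0] by simp]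
  exact List.dropLast_concat

lemma pv_rowXX (s : List String) (sbol0 sbol1 : String) :
    pvA_diffs (pvA_zeros (pvA_row3 (pvA_row2 (pvA_row1 s sbol0 sbol1) sbol0)))
      = pvB_scan ((pvB_flags s sbol0 sbol1).drop 1 ++ [0]) 0 := by
  rw [pv_row3_shape, pv_zeros_eq]
  have hz : pvZpos (0 :: ((pvB_flags s sbol0 sbol1).drop 1 ++ [0])) 0
      = 0 :: pvZpos ((pvB_flags s sbol0 sbol1).drop 1 ++ [0]) 1 := by
    simp [pvZpos]
  rw [hz, pv_diffs_zip]
  simp only [List.tail_cons]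
  rw [pv_zip_dif]
  have := pv_dif_scan ((pvB_flags s sbol0 sbol1).drop 1 ++ [0]) 0 0
  simpa using this

-- ===== VERDICT (by name: the statement is the Claim_ definition above) =====
theorem get_sents_lenth4_spec : Claim_equal_get_sents_lenth4 := by
  intro source sbol _hdom _hpre
  unfold Spec_get_sents_lenth4 get_sents_lenth4 get_sents_lenth4_alt
  simp only [List.map_map, Prod.mk.injEq]
  refine ⟨List.map_congr_left fun s _ => ?_, List.map_congr_left fun s _ => ?_⟩
  · simpa [Function.comp] using pv_rowXX s (sbol.getD 0 "") (sbol.getD 1 "")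
  · simpa [Function.comp] using pv_rowXO s (sbol.getD 0 "") (sbol.getD 1 "")
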